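-- pv_equiv track=rewrite | github.com/vlad-a-c/PlayPalace11 | server/core/documents/manager.py | _select_visible_title
-- ===== SOURCE A (Python) =====
-- def _select_visible_title(
--     titles: dict[str, str],
--     visible_locales: list[str],
--     preferred_locale: str,
--     source_locale: str,
--     folder_name: str,
-- ) -> str:
--     """Pick the best available title without using hidden locales."""
--     ordered_locales: list[str] = []
--     for locale_code in [
--         preferred_locale,
--         source_locale,
--         "en",
--         *sorted(visible_locales),
--     ]:
--         if locale_code in visible_locales and locale_code not in ordered_locales:
--             ordered_locales.append(locale_code)
--
--     for locale_code in ordered_locales: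
--         title = titles.get(locale_code)
--         if title:
--             return title
--     return folder_name
-- ===== SOURCE B (Python) =====
-- def _select_visible_title(
--     titles: dict[str, str],
--     visible_locales: list[str],
--     preferred_locale: str,
--     source_locale: str,
--     folder_name: str,
-- ) -> str:
--     """Pick the best available title without using hidden locales."""
--
--     def priority(locale_code: str) -> tuple[int, str]:
--         if locale_code == preferred_locale:
--             rank = 0
--         elif locale_code == source_locale:
--             rank = 1
--         elif locale_code == "en":
--             rank = 2
--         else:
--             rank = 3
--         return (rank, locale_code)
--
--     best = None  # (locale, title) with minimal priority among truthy titles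
--     for locale_code in visible_locales:
--         title = titles.get(locale_code)
--         if title and (best is None or priority(locale_code) < priority(best[0])):
--             best = (locale_code, title)
--     return folder_name if best is None else best[1]
-- ===== Notes on version B (the rewrite author's own statement) =====
-- stated objective: faster
-- what changed: Replaces A's sort of visible_locales + quadratic dedup into ordered_locales + second scan by a single unsorted pass over visible_locales that keeps the truthy-titled locale with the minimal priority key (rank by preferred/source/'en'/other, tie-broken by the locale string, which reproduces the sorted order); a selection-by-minimum instead of a build-ordered-list-then-scan.
import Mathlib
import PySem

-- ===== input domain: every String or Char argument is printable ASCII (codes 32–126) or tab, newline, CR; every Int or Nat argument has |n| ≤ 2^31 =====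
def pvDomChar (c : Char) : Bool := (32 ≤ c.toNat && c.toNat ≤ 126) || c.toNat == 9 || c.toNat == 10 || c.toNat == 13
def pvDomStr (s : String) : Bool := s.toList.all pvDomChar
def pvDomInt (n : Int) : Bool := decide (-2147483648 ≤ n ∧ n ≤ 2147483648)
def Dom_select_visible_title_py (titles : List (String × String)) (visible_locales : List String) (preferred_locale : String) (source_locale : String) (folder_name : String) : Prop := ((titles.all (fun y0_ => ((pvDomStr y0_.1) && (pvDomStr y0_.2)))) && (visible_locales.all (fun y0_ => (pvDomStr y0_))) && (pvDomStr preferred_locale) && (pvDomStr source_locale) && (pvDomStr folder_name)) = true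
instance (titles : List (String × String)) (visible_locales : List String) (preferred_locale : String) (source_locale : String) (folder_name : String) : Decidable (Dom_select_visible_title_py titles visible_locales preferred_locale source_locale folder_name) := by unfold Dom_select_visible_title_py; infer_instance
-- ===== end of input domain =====

-- B replaces A's sort + dedup + ordered scan by one unsorted pass keeping the
-- truthy-titled locale of minimal priority key; objective: faster (no sort, no
-- quadratic dedup).

-- ===== PORT A =====
-- titles.get(k): first-match lookup in the association list (Python dict lookup)
def pvTitlesGet (titles : List (String × String)) (k : String) : Option String :=
  (titles.find? (fun p => p.1 == k)).map (·.2)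

-- A, loop 1: build ordered_locales by foldl over the candidate list
def pvBuildOrdered (visible_locales : List String) (cands : List String) : List String :=
  cands.foldl (fun acc c => if c ∈ visible_locales ∧ c ∉ acc then acc ++ [c] else acc) []

-- A, loop 2: first truthy title among ordered_locales, else folder_name
def pvScanA (titles : List (String × String)) (folder_name : String) : List String → String
  | [] => folder_name
  | c :: rest =>
    match pvTitlesGet titles c with
    | some t => if t ≠ "" then t else pvScanA titles folder_name rest
    | none => pvScanA titles folder_name rest

def select_visible_title_py (titles : List (String × String)) (visible_locales : List String) (preferred_locale : String) (source_locale : String) (folder_name : String) : String :=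
  pvScanA titles folder_name
    (pvBuildOrdered visible_locales
      ([preferred_locale, source_locale, "en"] ++ PySem.List.sorted visible_locales (fun x => x) false))

-- ===== PORT B =====
-- priority(locale_code): the rank component of B's key
def pvRank (preferred_locale source_locale : String) (l : String) : Nat :=
  if l == preferred_locale then 0 else if l == source_locale then 1 else if l == "en" then 2 else 3

-- tuple comparison priority(a) < priority(b): lexicographic on (rank, string)
def pvPriLt (preferred_locale source_locale : String) (a b : String) : Bool :=
  decide (pvRank preferred_locale source_locale a < pvRank preferred_locale source_locale b) ||
  (decide (pvRank preferred_locale source_locale a = pvRank preferred_locale source_locale b) && decide (a < b))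

-- B's loop body: keep the best (locale, title) seen so far
def pvStepB (titles : List (String × String)) (preferred_locale source_locale : String)
    (best : Option (String × String)) (loc : String) : Option (String × String) :=
  match pvTitlesGet titles loc with
  | some t =>
    if t ≠ "" then
      match best with
      | none => some (loc, t)
      | some (bl, bt) => if pvPriLt preferred_locale source_locale loc bl then some (loc, t) else some (bl, bt)
    else best
  | none => best

def select_visible_title_py_alt (titles : List (String × String)) (visible_locales : List String) (preferred_locale : String) (source_locale : String) (folder_name : String) : String :=
  match visible_locales.foldl (pvStepB titles preferred_locale source_locale) none with
  | none => folder_name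
  | some (_, bt) => bt

-- ===== PRECONDITION & SPEC =====
def Spec_select_visible_title_py (titles : List (String × String)) (visible_locales : List String) (preferred_locale : String) (source_locale : String) (folder_name : String) (out : String) : Prop := out = select_visible_title_py_alt titles visible_locales preferred_locale source_locale folder_name
instance (titles : List (String × String)) (visible_locales : List String) (preferred_locale : String) (source_locale : String) (folder_name : String) (out : String) : Decidable (Spec_select_visible_title_py titles visible_locales preferred_locale source_locale folder_name out) := by unfold Spec_select_visible_title_py; infer_instance

-- ===== CLAIM (what is proved, stated in full; the proofs are below) =====
def Claim_equal_select_visible_title_py : Prop := ∀ (titles : List (String × String)) (visible_locales : List String) (preferred_locale : String) (source_locale : String) (folder_name : String), Dom_select_visible_title_py titles visible_locales preferred_locale source_locale folder_name → Spec_select_visible_title_py titles visible_locales preferred_locale source_locale folder_name (select_visible_title_py titles visible_locales preferred_locale source_locale folder_name)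

-- ===== LEMMAS AND PROOFS =====

-- the "hit" of a candidate in A's second loop (no visibility test)
def pvHitA (titles : List (String × String)) (c : String) : Option String :=
  match pvTitlesGet titles c with
  | some t => if t ≠ "" then some t else none
  | none => none

-- the "hit" of a candidate in A's scan with the visibility test included
def pvHitB (titles : List (String × String)) (visible_locales : List String) (c : String) : Option String :=
  if c ∈ visible_locales then pvHitA titles c else none

lemma pvScanA_eq_findSome (titles : List (String × String)) (folder_name : String) (l : List String) :
    pvScanA titles folder_name l = (l.findSome? (pvHitA titles)).getD folder_name := by
  induction l with
  | nil => rfl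
  | cons c rest ih =>
    simp only [pvScanA, List.findSome?_cons, pvHitA]
    cases h : pvTitlesGet titles c with
    | none => simpa using ih
    | some t =>
      by_cases ht : t = ""
      · simp [ht, ih]
      · simp [ht]

-- A's findSome? over the dedup-filtered accumulator-built list equals
-- acc's findSome? orElse findSome? with the visibility test fused in
lemma pvFold_findSome (titles : List (String × String)) (visible_locales : List String)
    (l : List String) : ∀ (acc : List String), (∀ x ∈ acc, x ∈ visible_locales) →
    ((l.foldl (fun acc c => if c ∈ visible_locales ∧ c ∉ acc then acc ++ [c] else acc) acc).findSome?
        (pvHitA titles))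
      = (acc.findSome? (pvHitA titles)).or (l.findSome? (pvHitB titles visible_locales)) := by
  induction l with
  | nil => intro acc hacc; simp
  | cons c rest ih =>
    intro acc hacc
    rw [List.foldl_cons, List.findSome?_cons]
    by_cases hv : c ∈ visible_locales
    · by_cases hm : c ∈ acc
      · rw [if_neg (by simp [hm]), ih acc hacc]
        cases hA : acc.findSome? (pvHitA titles) with
        | some t => simp
        | none =>
          have hz : pvHitA titles c = none :=
            (List.findSome?_eq_none_iff.mp hA) c hm
          simp [pvHitB, hv, hz]
      · have hsub : ∀ x ∈ acc ++ [c], x ∈ visible_locales := by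
          intro x hx
          rcases List.mem_append.mp hx with h | h
          · exact hacc x h
          · rw [List.mem_singleton.mp h]; exact hv
        rw [if_pos ⟨hv, hm⟩, ih (acc ++ [c]) hsub, List.findSome?_append]
        have hbc : pvHitB titles visible_locales c = pvHitA titles c := by simp [pvHitB, hv]
        cases hc : pvHitA titles c with
        | some t => simp [hbc, hc]
        | none => simp [hbc, hc]
    · rw [if_neg (by simp [hv]), ih acc hacc]
      simp [pvHitB, hv]

-- order facts about the priority comparison
lemma pvPriLt_irrefl (p s a : String) : pvPriLt p s a a = false := by
  simp [pvPriLt]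

lemma pvPriLt_trans {p s a b c : String} (h1 : pvPriLt p s a b = true) (h2 : pvPriLt p s b c = true) :
    pvPriLt p s a c = true := by
  simp only [pvPriLt, Bool.or_eq_true, Bool.and_eq_true, decide_eq_true_eq] at *
  rcases h1 with h1 | ⟨h1e, h1s⟩ <;> rcases h2 with h2 | ⟨h2e, h2s⟩
  · exact Or.inl (Nat.lt_trans h1 h2)
  · exact Or.inl (h2e ▸ h1)
  · exact Or.inl (h1e ▸ h2)
  · exact Or.inr ⟨h1e.trans h2e, lt_trans h1s h2s⟩

-- characterization of B's fold: either no truthy visible title was seen, or the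
-- result is a truthy-titled seen locale of minimal priority
lemma pvFoldB_inv (titles : List (String × String)) (p s : String) (l : List String) :
    ∀ (seen : List String) (acc : Option (String × String)),
    ((acc = none → ∀ x ∈ seen, pvHitA titles x = none) ∧
     (∀ bl bt, acc = some (bl, bt) → bl ∈ seen ∧ pvHitA titles bl = some bt ∧
        ∀ y ∈ seen, pvHitA titles y ≠ none → pvPriLt p s y bl = false)) →
    ((l.foldl (pvStepB titles p s) acc = none → ∀ x ∈ seen ++ l, pvHitA titles x = none) ∧
     (∀ bl bt, l.foldl (pvStepB titles p s) acc = some (bl, bt) → bl ∈ seen ++ l ∧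
        pvHitA titles bl = some bt ∧
        ∀ y ∈ seen ++ l, pvHitA titles y ≠ none → pvPriLt p s y bl = false)) := by
  induction l with
  | nil => intro seen acc h; simpa using h
  | cons c rest ih =>
    intro seen acc h
    have hstep : ((pvStepB titles p s acc c = none → ∀ x ∈ seen ++ [c], pvHitA titles x = none) ∧
        (∀ bl bt, pvStepB titles p s acc c = some (bl, bt) → bl ∈ seen ++ [c] ∧
          pvHitA titles bl = some bt ∧
          ∀ y ∈ seen ++ [c], pvHitA titles y ≠ none → pvPriLt p s y bl = false)) := by
      obtain ⟨hnone, hsome⟩ := h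
      cases hg : pvTitlesGet titles c with
      | none =>
        have hc : pvHitA titles c = none := by simp [pvHitA, hg]
        constructor
        · intro hz x hx
          rcases List.mem_append.mp hx with hx | hx
          · exact hnone (by simpa [pvStepB, hg] using hz) x hx
          · rw [List.mem_singleton.mp hx]; exact hc
        · intro bl bt hb
          have hb' : acc = some (bl, bt) := by simpa [pvStepB, hg] using hb
          obtain ⟨h1, h2, h3⟩ := hsome bl bt hb'
          refine ⟨List.mem_append.mpr (Or.inl h1), h2, ?_⟩
          intro y hy hhy
          rcases List.mem_append.mp hy with hy | hy
          · exact h3 y hy hhy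
          · rw [List.mem_singleton.mp hy] at hhy; exact absurd hc hhy
      | some t =>
        by_cases ht : t = ""
        · have hc : pvHitA titles c = none := by simp [pvHitA, hg, ht]
          constructor
          · intro hz x hx
            rcases List.mem_append.mp hx with hx | hx
            · exact hnone (by simpa [pvStepB, hg, ht] using hz) x hx
            · rw [List.mem_singleton.mp hx]; exact hc
          · intro bl bt hb
            have hb' : acc = some (bl, bt) := by simpa [pvStepB, hg, ht] using hb
            obtain ⟨h1, h2, h3⟩ := hsome bl bt hb'
            refine ⟨List.mem_append.mpr (Or.inl h1), h2, ?_⟩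
            intro y hy hhy
            rcases List.mem_append.mp hy with hy | hy
            · exact h3 y hy hhy
            · rw [List.mem_singleton.mp hy] at hhy; exact absurd hc hhy
        · have hc : pvHitA titles c = some t := by simp [pvHitA, hg, ht]
          cases hacc : acc with
          | none =>
            constructor
            · intro hz; simp [pvStepB, hg, ht] at hz
            · intro bl bt hb
              have hb' : (c, t) = (bl, bt) := by
                simpa [pvStepB, hg, ht, hacc] using hb
              obtain ⟨rfl, rfl⟩ := Prod.mk.inj hb'
              refine ⟨List.mem_append.mpr (Or.inr (List.mem_singleton.mpr rfl)), hc, ?_⟩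
              intro y hy hhy
              rcases List.mem_append.mp hy with hy | hy
              · exact absurd (hnone hacc y hy) hhy
              · rw [List.mem_singleton.mp hy]; exact pvPriLt_irrefl p s c
          | some b0 =>
            obtain ⟨b0l, b0t⟩ := b0
            obtain ⟨h1, h2, h3⟩ := hsome b0l b0t hacc
            by_cases hlt : pvPriLt p s c b0l = true
            · constructor
              · intro hz; simp [pvStepB, hg, ht, hlt] at hz
              · intro bl bt hb
                have hb' : (c, t) = (bl, bt) := by
                  simpa [pvStepB, hg, ht, hacc, hlt] using hb
                obtain ⟨rfl, rfl⟩ := Prod.mk.inj hb'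
                refine ⟨List.mem_append.mpr (Or.inr (List.mem_singleton.mpr rfl)), hc, ?_⟩
                intro y hy hhy
                rcases List.mem_append.mp hy with hy | hy
                · have hyb := h3 y hy hhy
                  by_contra hyc
                  have hyc' : pvPriLt p s y c = true := by
                    cases hx : pvPriLt p s y c
                    · exact absurd hx hyc
                    · rfl
                  exact absurd (pvPriLt_trans hyc' hlt) (by simp [hyb])
                · rw [List.mem_singleton.mp hy]; exact pvPriLt_irrefl p s c
            · have hlt' : pvPriLt p s c b0l = false := by
                cases hx : pvPriLt p s c b0l
                · rfl
                · exact absurd hx hlt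
              constructor
              · intro hz; simp [pvStepB, hg, ht, hlt'] at hz
              · intro bl bt hb
                have hb' : (b0l, b0t) = (bl, bt) := by
                  simpa [pvStepB, hg, ht, hacc, hlt'] using hb
                obtain ⟨rfl, rfl⟩ := Prod.mk.inj hb'
                refine ⟨List.mem_append.mpr (Or.inl h1), h2, ?_⟩
                intro y hy hhy
                rcases List.mem_append.mp hy with hy | hy
                · exact h3 y hy hhy
                · rw [List.mem_singleton.mp hy]; exact hlt'
    have := ih (seen ++ [c]) (pvStepB titles p s acc c) hstep
    simpa [List.append_assoc] using this

-- first hit of a ≤-sorted list, when the hitting element m is ≤ all hits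
lemma pvFindSome_sorted {S : List String} {f : String → Option String} {m : String} {v : String}
    (hs : S.Pairwise (· ≤ ·)) (hm : m ∈ S) (hv : f m = some v)
    (hall : ∀ c ∈ S, (f c).isSome → m ≤ c) : S.findSome? f = some v := by
  induction S with
  | nil => cases hm
  | cons c rest ih =>
    rw [List.findSome?_cons]
    cases hfc : f c with
    | some w =>
      have hmc : m ≤ c := hall c (List.mem_cons_self ..) (by simp [hfc])
      rcases List.mem_cons.mp hm with rfl | hm'
      · rw [hv] at hfc; exact hfc.symm ▸ rfl
      · have hcm : c ≤ m := (List.pairwise_cons.mp hs).1 m hm'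
        have : c = m := le_antisymm hcm hmc
        rw [this, hv] at hfc; exact hfc.symm ▸ rfl
    | none =>
      have hm' : m ∈ rest := by
        rcases List.mem_cons.mp hm with rfl | hm'
        · rw [hv] at hfc; cases hfc
        · exact hm'
      exact ih (List.pairwise_cons.mp hs).2 hm'
        (fun c hc => hall c (List.mem_cons_of_mem _ hc))

-- rank case facts
lemma pvRank_eq_zero {p s l : String} (h : pvRank p s l = 0) : l = p := by
  simp only [pvRank] at h; split_ifs at h with h1 h2 h3; simp_all
lemma pvRank_eq_one {p s l : String} (h : pvRank p s l = 1) : l = s ∧ l ≠ p := by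
  simp only [pvRank] at h; split_ifs at h with h1 h2 h3 <;> simp_all
lemma pvRank_eq_two {p s l : String} (h : pvRank p s l = 2) : l = "en" ∧ l ≠ p ∧ l ≠ s := by
  simp only [pvRank] at h; split_ifs at h with h1 h2 h3 <;> simp_all
lemma pvRank_self_p (p s : String) : pvRank p s p = 0 := by simp [pvRank]
lemma pvRank_s_le_one (p s : String) : pvRank p s s ≤ 1 := by
  simp only [pvRank]; split_ifs <;> simp_all
lemma pvRank_en_le_two (p s : String) : pvRank p s "en" ≤ 2 := by
  simp only [pvRank]; split_ifs <;> simp_all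
lemma pvRank_le_three (p s l : String) : pvRank p s l ≤ 3 := by
  simp only [pvRank]; split_ifs <;> omega

-- if some y's rank is strictly below bl's rank then y's priority is below bl's
lemma pvPriLt_of_rank_lt {p s y bl : String} (h : pvRank p s y < pvRank p s bl) :
    pvPriLt p s y bl = true := by
  simp [pvPriLt, h]

-- the minimal truthy visible locale is the first hit of A's candidate scan
lemma pvScan_min (titles : List (String × String)) (visible_locales : List String)
    (p s : String) (bl bt : String) (hbl : bl ∈ visible_locales)
    (hhit : pvHitA titles bl = some bt)
    (hmin : ∀ y ∈ visible_locales, pvHitA titles y ≠ none → pvPriLt p s y bl = false) :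
    (p :: s :: "en" :: PySem.List.sorted visible_locales (fun x => x) false).findSome?
      (pvHitB titles visible_locales) = some bt := by
  -- any candidate with a hit is visible and truthy, hence its priority is not below bl's
  have hnotlt : ∀ c, pvHitB titles visible_locales c ≠ none → c ∈ visible_locales ∧
      pvPriLt p s c bl = false := by
    intro c hc
    by_cases hv : c ∈ visible_locales
    · refine ⟨hv, hmin c hv ?_⟩
      simpa [pvHitB, hv] using hc
    · simp [pvHitB, hv] at hc
  have hblB : pvHitB titles visible_locales bl = some bt := by simp [pvHitB, hbl, hhit]
  -- rank bounds: no hit can have rank strictly below bl's rank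
  have hrk : ∀ c, pvHitB titles visible_locales c ≠ none → ¬ pvRank p s c < pvRank p s bl := by
    intro c hc hlt
    exact absurd (pvPriLt_of_rank_lt hlt) (by simp [(hnotlt c hc).2])
  rcases hr : pvRank p s bl with _ | _ | _ | n
  · -- rank 0: bl = p (or p has rank 0 anyway); first candidate p hits with value bt
    have hbp : bl = p := pvRank_eq_zero hr
    rw [List.findSome?_cons, ← hbp, hblB]
  · -- rank 1: bl = s, bl ≠ p; p cannot hit, then s hits
    obtain ⟨hbs, hbp⟩ := pvRank_eq_one hr
    have hp : pvHitB titles visible_locales p = none := by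
      by_contra h
      exact hrk p h (by rw [pvRank_self_p, hr]; omega)
    rw [List.findSome?_cons, hp, List.findSome?_cons, ← hbs, hblB]
  · -- rank 2: bl = "en"; p and s cannot hit
    obtain ⟨hben, hbp, hbs⟩ := pvRank_eq_two hr
    have hp : pvHitB titles visible_locales p = none := by
      by_contra h
      exact hrk p h (by rw [pvRank_self_p, hr]; omega)
    have hsn : pvHitB titles visible_locales s = none := by
      by_contra h
      exact hrk s h (by have := pvRank_s_le_one p s; omega)
    rw [List.findSome?_cons, hp, List.findSome?_cons, hsn, List.findSome?_cons, ← hben, hblB]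
  · -- rank 3: p, s, "en" cannot hit; first hit of the sorted tail is bl
    have h3 : pvRank p s bl = 3 := by have := pvRank_le_three p s bl; omega
    have hp : pvHitB titles visible_locales p = none := by
      by_contra h
      exact hrk p h (by rw [pvRank_self_p, h3]; omega)
    have hsn : pvHitB titles visible_locales s = none := by
      by_contra h
      exact hrk s h (by have := pvRank_s_le_one p s; omega)
    have hen : pvHitB titles visible_locales "en" = none := by
      by_contra h
      exact hrk "en" h (by have := pvRank_en_le_two p s; omega)
    rw [List.findSome?_cons, hp, List.findSome?_cons, hsn, List.findSome?_cons, hen]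
    refine pvFindSome_sorted (PySem.List.sorted_pairwise ..) ?_ hblB ?_
    · exact (PySem.List.mem_sorted ..).mpr hbl
    · intro c hc hcs
      have hcne : pvHitB titles visible_locales c ≠ none := by
        intro h; rw [h] at hcs; cases hcs
      have hc3 : pvRank p s c = 3 := by
        have hle := pvRank_le_three p s c
        have := hrk c hcne
        omega
      have := (hnotlt c hcne).2
      simp only [pvPriLt, Bool.or_eq_false_iff, Bool.and_eq_false_iff,
        decide_eq_false_iff_not] at this
      rcases this.2 with h | h
      · exact absurd (hc3.trans h3.symm) h
      · exact le_of_not_gt (by simpa [decide_eq_true_eq] using h)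

-- ===== VERDICT (by name: the statement is the Claim_ definition above) =====
theorem select_visible_title_py_spec : Claim_equal_select_visible_title_py := by
  intro titles visible_locales p s folder_name _
  unfold Spec_select_visible_title_py select_visible_title_py select_visible_title_py_alt
    pvBuildOrdered
  rw [pvScanA_eq_findSome, pvFold_findSome titles visible_locales _ [] (by simp)]
  have hinv := pvFoldB_inv titles p s visible_locales [] none
    (by constructor
        · intro _ x hx; cases hx
        · intro bl bt h; cases h)
  cases hf : visible_locales.foldl (pvStepB titles p s) none with
  | none =>
    have hz := hinv.1 hf
    have : (p :: s :: "en" :: PySem.List.sorted visible_locales (fun x => x) false).findSome?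
        (pvHitB titles visible_locales) = none := by
      rw [List.findSome?_eq_none_iff]
      intro c hc
      by_cases hv : c ∈ visible_locales
      · simp [pvHitB, hv, hz c (by simpa using hv)]
      · simp [pvHitB, hv]
    simp [this]
  | some b =>
    obtain ⟨bl, bt⟩ := b
    obtain ⟨h1, h2, h3⟩ := hinv.2 bl bt hf
    have := pvScan_min titles visible_locales p s bl bt (by simpa using h1) h2
      (fun y hy => h3 y (by simpa using hy))
    simp [this]
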